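-- pv_equiv track=rewrite | github.com/Karaage-Cluster/python-tldap | tldap/dn.py | _whitespace
-- ===== SOURCE A (Python) =====
-- def _whitespace(value, i):
--     while True:
--         if i >= len(value):
--             break
--         if not _isSPACE(value[i]):
--             break
--         i = i + 1
--
--     return ("", i)
--
-- def _isSPACE(char):
--     assert len(char) == 1
--     return char == ' '
-- ===== SOURCE B (Python) =====
-- def _whitespace(value, i):
--     tail = value[i:]
--     return ("", i + len(tail) - len(tail.lstrip(' ')))
-- ===== Notes on version B (the rewrite author's own statement) =====
-- stated objective: idiomatic
-- what changed: Replaces the char-by-char while loop over _isSPACE with one slice plus str.lstrip(' '), computing the new index from the length difference with no explicit loop.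
-- outside the precondition, e.g. on _whitespace(' ', -1): A returns ('', 1), B returns ('', 0); on _whitespace('', -1): A raises IndexError, B returns ('', -1)
import Mathlib
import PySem

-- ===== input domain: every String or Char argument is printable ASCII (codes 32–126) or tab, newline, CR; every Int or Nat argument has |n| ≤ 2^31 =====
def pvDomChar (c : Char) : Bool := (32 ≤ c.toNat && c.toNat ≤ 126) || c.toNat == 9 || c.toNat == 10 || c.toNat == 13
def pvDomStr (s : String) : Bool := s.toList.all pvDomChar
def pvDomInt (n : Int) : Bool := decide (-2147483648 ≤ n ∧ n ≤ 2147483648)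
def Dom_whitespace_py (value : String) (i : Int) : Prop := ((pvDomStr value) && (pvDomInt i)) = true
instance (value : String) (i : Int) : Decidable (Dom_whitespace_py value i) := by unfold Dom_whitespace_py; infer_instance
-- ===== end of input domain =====

-- B replaces A's char-by-char space-scanning loop with a slice + lstrip(' ') length difference (idiomatic, no explicit loop).


-- ===== PORT A =====
-- _isSPACE(char): char == ' '  (the assert len(char)==1 always holds: char comes from indexing)
def isSPACE_py (c : Char) : Bool := c == ' '

-- the 'while True' loop of A: advances i past spaces; on IndexError (pyGet? = none,
-- excluded by Pre_) it stops with the current i.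
def whitespaceLoop (value : String) (i : Int) : Int :=
  if _h : (value.toList.length : Int) ≤ i then i
  else
    match PySem.Str.pyGet? value i with
    | none => i   -- Python raises IndexError here; outside Pre_
    | some c => if isSPACE_py c then whitespaceLoop value (i + 1) else i
termination_by ((value.toList.length : Int) - i).toNat
decreasing_by omega

def whitespace_py (value : String) (i : Int) : String × Int :=
  ("", whitespaceLoop value i)

-- ===== PORT B =====
def whitespace_py_alt (value : String) (i : Int) : String × Int :=
  let tail := PySem.Str.slice value (some i) none
  -- tail.lstrip(' ') ported by hand (PySem.Str.lstrip is the no-argument form): dropping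
  -- leading ' ' characters is exactly Python's str.lstrip(' ')
  let stripped := tail.toList.dropWhile (· == ' ')
  ("", i + (tail.toList.length : Int) - (stripped.length : Int))

-- ===== PRECONDITION & SPEC =====
-- Pre_ excludes negative i: there A indexes with Python's negative-index wraparound
-- (raising IndexError when -i > len(value), and otherwise returning an accidental
-- wrapped-scan value no caller relies on), while B slices from the end.
def Pre_whitespace_py (_value : String) (i : Int) : Prop := 0 ≤ i
instance (value : String) (i : Int) : Decidable (Pre_whitespace_py value i) := by unfold Pre_whitespace_py; infer_instance
def pvWitness_whitespace_py : String × Int := ("  ab", 0)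

def Spec_whitespace_py (value : String) (i : Int) (out : String × Int) : Prop := out = whitespace_py_alt value i
instance (value : String) (i : Int) (out : String × Int) : Decidable (Spec_whitespace_py value i out) := by unfold Spec_whitespace_py; infer_instance

-- ===== CLAIM (what is proved, stated in full; the proofs are below) =====
def Claim_equal_whitespace_py : Prop := ∀ (value : String) (i : Int), Dom_whitespace_py value i → Pre_whitespace_py value i → Spec_whitespace_py value i (whitespace_py value i)

-- ===== LEMMAS AND PROOFS =====

-- A's loop starting at i ≥ 0 lands at i plus the number of leading spaces of the suffix.
lemma whitespaceLoop_eq (value : String) :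
    ∀ (n : Nat) (i : Int), 0 ≤ i → n = value.toList.length - i.toNat →
      whitespaceLoop value i
        = i + (((value.toList.drop i.toNat).takeWhile (· == ' ')).length : Int) := by
  intro n
  induction n with
  | zero =>
    intro i hi hn
    have hlen : value.toList.length ≤ i.toNat := by omega
    rw [whitespaceLoop, dif_pos (show (value.toList.length : Int) ≤ i by omega)]
    simp [List.drop_eq_nil_of_le hlen]
  | succ n ih =>
    intro i hi hn
    have hlt : i.toNat < value.toList.length := by omega
    have hcast : i = (i.toNat : Int) := by omega
    rw [whitespaceLoop, dif_neg (show ¬ (value.toList.length : Int) ≤ i by omega)]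
    rw [hcast, PySem.Str.pyGet?_natCast]
    have hget : value.toList[i.toNat]? = some (value.toList[i.toNat]'hlt) :=
      List.getElem?_eq_getElem hlt
    rw [hget]
    have hdrop : value.toList.drop i.toNat
        = value.toList[i.toNat]'hlt :: value.toList.drop (i.toNat + 1) :=
      List.drop_eq_getElem_cons hlt
    by_cases hc : isSPACE_py (value.toList[i.toNat]'hlt)
    · have h1 : ((i.toNat : Int) + 1).toNat = i.toNat + 1 := by omega
      have hih := ih ((i.toNat : Int) + 1) (by omega) (by omega)
      have hc' : (value.toList[i.toNat]'hlt == ' ') = true := hc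
      simp only [hc, if_true, hih, h1, Int.toNat_natCast, hdrop, List.takeWhile_cons, hc']
      simp
      omega
    · have hc' : (value.toList[i.toNat]'hlt == ' ') = false := by
        simpa [isSPACE_py] using hc
      simp only [hc, Int.toNat_natCast, hdrop, List.takeWhile_cons, hc']
      simp

lemma length_dropWhile_plus (l : List Char) :
    l.length - (l.dropWhile (· == ' ')).length = (l.takeWhile (· == ' ')).length := by
  have h := List.takeWhile_append_dropWhile (p := (· == ' ')) (l := l)
  have h2 := congrArg List.length h
  rw [List.length_append] at h2
  omega

-- ===== VERDICT (by name: the statement is the Claim_ definition above) =====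
theorem whitespace_py_spec : Claim_equal_whitespace_py := by
  intro value i _hdom hpre
  unfold Spec_whitespace_py whitespace_py whitespace_py_alt
  have hpre' : (0 : Int) ≤ i := hpre
  have htail : (PySem.Str.slice value (some i) none).toList = value.toList.drop i.toNat := by
    rw [PySem.Str.toList_slice, PySem.Chars.slice_eq_listSlice, PySem.List.slice_from _ hpre']
  rw [whitespaceLoop_eq value (value.toList.length - i.toNat) i hpre' rfl]
  simp only [htail]
  have hle : ((value.toList.drop i.toNat).dropWhile (· == ' ')).length
      ≤ (value.toList.drop i.toNat).length := List.length_dropWhile_le _ _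
  have := length_dropWhile_plus (value.toList.drop i.toNat)
  congr 1
  omega
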